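-- pv_equiv track=rewrite | github.com/LaboiteNoire/LoBot_02 | wskp0001/TypographieFile.py | lenDivisionAuxiliar
-- ===== SOURCE A (Python) =====
-- def lenDivisionAuxiliar(my_list : list ,enca_value : int , txt=""):
--     if my_list == []:
--         return txt
--     else:
--         if len(my_list) > enca_value:
--             return txt
--         else:
--             if (len(txt) + len(my_list[0]) + 4) < enca_value:
--                 return lenDivisionAuxiliar(my_list[1:],enca_value,txt + " `" + my_list[0] + "` ")
--             else:
--                 return txt
-- ===== SOURCE B (Python) =====
-- def lenDivisionAuxiliar(my_list : list, enca_value : int, txt=""):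
--     if len(my_list) > enca_value:
--         return txt
--     for item in my_list:
--         if len(txt) + len(item) + 4 < enca_value:
--             txt = txt + " `" + item + "` "
--         else:
--             return txt
--     return txt
-- ===== Notes on version B (the rewrite author's own statement) =====
-- stated objective: simpler
-- what changed: Replaced accumulator-passing tail recursion (re-checking the count guard every call) by a single up-front guard plus an iterative for-loop with early return.
import Mathlib
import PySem

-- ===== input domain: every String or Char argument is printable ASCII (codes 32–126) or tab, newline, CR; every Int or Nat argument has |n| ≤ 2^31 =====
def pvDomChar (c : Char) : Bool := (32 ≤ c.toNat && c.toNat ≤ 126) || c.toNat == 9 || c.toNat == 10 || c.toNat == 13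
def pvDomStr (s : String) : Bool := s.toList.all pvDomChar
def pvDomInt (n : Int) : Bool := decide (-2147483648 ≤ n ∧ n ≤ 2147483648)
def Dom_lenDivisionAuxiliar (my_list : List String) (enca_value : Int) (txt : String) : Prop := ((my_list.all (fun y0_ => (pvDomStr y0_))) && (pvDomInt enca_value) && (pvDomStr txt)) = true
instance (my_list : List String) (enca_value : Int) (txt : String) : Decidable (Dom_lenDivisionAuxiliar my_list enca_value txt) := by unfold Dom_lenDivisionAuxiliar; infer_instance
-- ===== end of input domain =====

-- B hoists A's per-call count guard to a single up-front check and replaces the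
-- accumulator-passing tail recursion by an iterative loop with early return (objective: simpler).

-- ===== PORT A =====
-- literal transliteration of A: recursion on my_list, guard re-checked every call
def lenDivisionAuxiliar (my_list : List String) (enca_value : Int) (txt : String) : String :=
  match my_list with
  | [] => txt
  | h :: t =>
      if (((h :: t).length : Int) > enca_value) then txt
      else if PySem.Str.len txt + PySem.Str.len h + 4 < enca_value then
        lenDivisionAuxiliar t enca_value (txt ++ " `" ++ h ++ "` ")
      else txt

-- ===== PORT B =====
-- the for-loop of Source B: early return on the first item that does not fit
def lenDivisionLoop (items : List String) (enca_value : Int) (txt : String) : String :=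
  match items with
  | [] => txt
  | item :: rest =>
      if PySem.Str.len txt + PySem.Str.len item + 4 < enca_value then
        lenDivisionLoop rest enca_value (txt ++ " `" ++ item ++ "` ")
      else txt

def lenDivisionAuxiliar_alt (my_list : List String) (enca_value : Int) (txt : String) : String :=
  if ((my_list.length : Int) > enca_value) then txt
  else lenDivisionLoop my_list enca_value txt

-- ===== PRECONDITION & SPEC =====
def Spec_lenDivisionAuxiliar (my_list : List String) (enca_value : Int) (txt : String) (out : String) : Prop := out = lenDivisionAuxiliar_alt my_list enca_value txt
instance (my_list : List String) (enca_value : Int) (txt : String) (out : String) : Decidable (Spec_lenDivisionAuxiliar my_list enca_value txt out) := by unfold Spec_lenDivisionAuxiliar; infer_instance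

-- ===== CLAIM (what is proved, stated in full; the proofs are below) =====
def Claim_equal_lenDivisionAuxiliar : Prop := ∀ (my_list : List String) (enca_value : Int) (txt : String), Dom_lenDivisionAuxiliar my_list enca_value txt → Spec_lenDivisionAuxiliar my_list enca_value txt (lenDivisionAuxiliar my_list enca_value txt)

-- ===== LEMMAS AND PROOFS =====

-- once the list is short enough, A's per-call guard never fires again, so A is the plain loop
theorem lenDivisionAuxiliar_eq_loop (my_list : List String) (enca_value : Int) :
    ∀ txt : String, ((my_list.length : Int) ≤ enca_value) →
      lenDivisionAuxiliar my_list enca_value txt = lenDivisionLoop my_list enca_value txt := by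
  induction my_list with
  | nil => intro txt _; rfl
  | cons h t ih =>
      intro txt hle
      have hlen : ¬ (((h :: t).length : Int) > enca_value) := not_lt.mpr hle
      have hle' : ((t.length : Int) ≤ enca_value) := by
        simp only [List.length_cons] at hle; push_cast at hle ⊢; omega
      simp only [lenDivisionAuxiliar, lenDivisionLoop]
      rw [if_neg hlen]
      by_cases hc : PySem.Str.len txt + PySem.Str.len h + 4 < enca_value
      · rw [if_pos hc, if_pos hc, ih _ hle']
      · rw [if_neg hc, if_neg hc]

-- ===== VERDICT (by name: the statement is the Claim_ definition above) =====
theorem lenDivisionAuxiliar_spec : Claim_equal_lenDivisionAuxiliar := by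
  intro my_list enca_value txt _
  unfold Spec_lenDivisionAuxiliar lenDivisionAuxiliar_alt
  by_cases hg : ((my_list.length : Int) > enca_value)
  · rw [if_pos hg]
    cases my_list with
    | nil => rfl
    | cons h t => simp only [lenDivisionAuxiliar]; rw [if_pos hg]
  · rw [if_neg hg]
    exact lenDivisionAuxiliar_eq_loop my_list enca_value txt (not_lt.mp hg)
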